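-- pv_equiv track=rewrite | github.com/muneer78/misc | search-yaml.py | missing_title_or_date
-- ===== SOURCE A (Python) =====
-- def missing_title_or_date(lines):
--     in_front_matter = False
--     has_title = has_date = False
--     for line in lines:
--         if line.strip() == "---":
--             if not in_front_matter:
--                 in_front_matter = True
--                 continue
--             else:
--                 break  # End of front matter
--         if in_front_matter:
--             if line.lstrip().startswith("title:"):
--                 has_title = True
--             if line.lstrip().startswith("date:"):
--                 has_date = True
--     return in_front_matter and (not has_title or not has_date)
-- ===== SOURCE B (Python) =====
-- def missing_title_or_date(lines):
--     markers = [i for i, line in enumerate(lines) if line.strip() == "---"]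
--     if not markers:
--         return False
--     end = markers[1] if len(markers) > 1 else len(lines)
--     body = lines[markers[0] + 1:end]
--     has_title = any(line.lstrip().startswith("title:") for line in body)
--     has_date = any(line.lstrip().startswith("date:") for line in body)
--     return not (has_title and has_date)
-- ===== Notes on version B (the rewrite author's own statement) =====
-- stated objective: alternative
-- what changed: Instead of A's flag-driven single state-machine scan, B first computes the list of indices of all '---' marker lines via an enumerate-comprehension, slices the front-matter body out of the list between the first two markers (or to the end), and then answers with two declarative any() passes over that body slice.
import Mathlib
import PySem

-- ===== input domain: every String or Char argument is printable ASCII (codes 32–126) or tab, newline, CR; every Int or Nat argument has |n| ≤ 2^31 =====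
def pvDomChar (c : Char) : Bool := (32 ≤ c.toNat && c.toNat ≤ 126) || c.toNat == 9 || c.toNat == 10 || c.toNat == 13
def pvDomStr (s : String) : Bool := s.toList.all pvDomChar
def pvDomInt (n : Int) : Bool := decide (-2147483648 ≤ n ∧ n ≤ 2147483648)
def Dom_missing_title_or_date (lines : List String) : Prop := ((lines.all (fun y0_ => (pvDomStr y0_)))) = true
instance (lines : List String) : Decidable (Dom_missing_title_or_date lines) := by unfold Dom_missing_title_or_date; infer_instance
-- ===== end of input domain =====

-- B replaces A's flag-driven state machine by marker-index computation + list slicing + two any() passes over the body; objective: alternative decomposition, same cost.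


-- ===== PORT A =====
-- A's single loop with state (in_front_matter, has_title, has_date); 'break' returns the final expression.
def missingA_loop (lines : List String) (infm hasT hasD : Bool) : Bool :=
  match lines with
  | [] => infm && (!hasT || !hasD)
  | line :: rest =>
    if PySem.Str.strip line == "---" then
      if !infm then missingA_loop rest true hasT hasD
      else infm && (!hasT || !hasD)   -- break
    else if infm then
      missingA_loop rest infm
        (if PySem.Str.startswith (PySem.Str.lstrip line) "title:" then true else hasT)
        (if PySem.Str.startswith (PySem.Str.lstrip line) "date:" then true else hasD)
    else missingA_loop rest infm hasT hasD

def missing_title_or_date (lines : List String) : Bool :=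
  missingA_loop lines false false false

-- ===== PORT B =====
-- markers = [i for i, line in enumerate(lines) if line.strip() == "---"]
def missingB_markers (lines : List String) : List Int :=
  (PySem.List.enumerate lines).filterMap fun p =>
    if PySem.Str.strip p.2 == "---" then some p.1 else none

def missing_title_or_date_alt (lines : List String) : Bool :=
  match missingB_markers lines with
  | [] => false                                             -- if not markers: return False
  | m0 :: ms =>
    let endIdx : Int := match ms with                        -- markers[1] if len(markers) > 1 else len(lines)
      | m1 :: _ => m1
      | [] => (lines.length : Int)
    let body := PySem.List.slice lines (some (m0 + 1)) (some endIdx)   -- lines[markers[0]+1:end]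
    let hasTitle := body.any fun line => PySem.Str.startswith (PySem.Str.lstrip line) "title:"
    let hasDate := body.any fun line => PySem.Str.startswith (PySem.Str.lstrip line) "date:"
    !(hasTitle && hasDate)

-- ===== PRECONDITION & SPEC =====
def Spec_missing_title_or_date (lines : List String) (out : Bool) : Prop := out = missing_title_or_date_alt lines
instance (lines : List String) (out : Bool) : Decidable (Spec_missing_title_or_date lines out) := by unfold Spec_missing_title_or_date; infer_instance

-- ===== CLAIM =====
def Claim_equal_missing_title_or_date : Prop := ∀ (lines : List String), Dom_missing_title_or_date lines → Spec_missing_title_or_date lines (missing_title_or_date lines)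

-- ===== LEMMAS AND PROOFS =====

-- the marker predicate
def isM (l : String) : Bool := PySem.Str.strip l == "---"
def isT (l : String) : Bool := PySem.Str.startswith (PySem.Str.lstrip l) "title:"
def isD (l : String) : Bool := PySem.Str.startswith (PySem.Str.lstrip l) "date:"

-- markers with a general start offset
def mk (s : Int) (lines : List String) : List Int :=
  (PySem.List.enumerate lines s).filterMap fun p =>
    if PySem.Str.strip p.2 == "---" then some p.1 else none

theorem mk_nil (s : Int) : mk s [] = [] := by
  simp [mk, PySem.List.enumerate_nil]

theorem mk_cons (s : Int) (l : String) (ls : List String) :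
    mk s (l :: ls) = if isM l then s :: mk (s+1) ls else mk (s+1) ls := by
  unfold mk isM
  rw [PySem.List.enumerate_cons, List.filterMap_cons]
  by_cases h : (PySem.Str.strip l == "---") = true <;> simp [h]

theorem markers_eq_mk (lines : List String) : missingB_markers lines = mk 0 lines := rfl

-- mk over a marker-free prefix followed by a marker
theorem mk_append (pre : List String) (m : String) (rest : List String) (s : Int)
    (hpre : ∀ l ∈ pre, isM l = false) (hm : isM m = true) :
    mk s (pre ++ m :: rest) = (s + pre.length) :: mk (s + pre.length + 1) rest := by
  induction pre generalizing s with
  | nil => simp [mk_cons, hm]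
  | cons p ps ih =>
    have hp : isM p = false := hpre p (by simp)
    have := ih (s+1) (fun l hl => hpre l (by simp [hl]))
    have e1 : s + 1 + (ps.length : Int) = s + ((p :: ps).length : Int) := by
      simp only [List.length_cons]; push_cast; ring
    simp only [List.cons_append, mk_cons, hp, Bool.false_eq_true, if_false, this]
    rw [e1]

-- if mk is empty then no line is a marker
theorem mk_nil_iff (lines : List String) (s : Int) :
    mk s lines = [] ↔ ∀ l ∈ lines, isM l = false := by
  induction lines generalizing s with
  | nil => simp [mk_nil]
  | cons l ls ih =>
    by_cases h : isM l = true
    · simp [mk_cons, h]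
    · simp only [Bool.not_eq_true] at h
      simp [mk_cons, h, ih (s+1)]

-- head of mk versus takeWhile
theorem mk_head (rest : List String) (s : Int) :
    (mk s rest = [] ∧ rest.takeWhile (fun l => !isM l) = rest) ∨
    (∃ (j : Nat) (tl : List Int), mk s rest = (s + j) :: tl ∧
      rest.takeWhile (fun l => !isM l) = rest.take j ∧ j ≤ rest.length) := by
  induction rest generalizing s with
  | nil => left; simp [mk_nil]
  | cons l ls ih =>
    by_cases h : isM l = true
    · right; exact ⟨0, mk (s+1) ls, by simp [mk_cons, h], by simp [h], by simp⟩
    · simp only [Bool.not_eq_true] at h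
      rcases ih (s+1) with ⟨h1, h2⟩ | ⟨j, tl, h1, h2, h3⟩
      · left; simp [mk_cons, h, h1, h2]
      · right
        refine ⟨j+1, tl, ?_, ?_, by simp; omega⟩
        · simp [mk_cons, h, h1]; ring
        · simp [h, h2]

-- A's front-matter scan (phase inside front matter)
theorem missingA_loop_true (rest : List String) (hasT hasD : Bool) :
    missingA_loop rest true hasT hasD =
      !((hasT || (rest.takeWhile (fun l => !isM l)).any isT) &&
        (hasD || (rest.takeWhile (fun l => !isM l)).any isD)) := by
  induction rest generalizing hasT hasD with
  | nil => cases hasT <;> cases hasD <;> simp [missingA_loop]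
  | cons l ls ih =>
    by_cases h : isM l = true
    · simp only [isM] at h
      cases hasT <;> cases hasD <;> simp [missingA_loop, h, isM]
    · have h' : (PySem.Str.strip l == "---") = false := by simpa [isM] using h
      simp only [missingA_loop, h', Bool.false_eq_true, if_false, if_true, Bool.not_true]
      rw [ih]
      simp only [List.takeWhile_cons, isM, h', Bool.not_false, if_true, List.any_cons]
      cases hasT <;> cases hasD <;> cases ht : isT l <;> cases hd : isD l <;>
        simp [isT, isD] at ht hd ⊢ <;> simp [ht, hd]

-- A skipping the marker-free prefix
theorem missingA_loop_skip (pre : List String) (m : String) (rest : List String)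
    (hpre : ∀ l ∈ pre, isM l = false) (hm : isM m = true) :
    missingA_loop (pre ++ m :: rest) false false false = missingA_loop rest true false false := by
  induction pre with
  | nil => simp only [List.nil_append, missingA_loop]; simp [isM] at hm; simp [hm]
  | cons p ps ih =>
    have hp : (PySem.Str.strip p == "---") = false := by simpa [isM] using hpre p (by simp)
    simp only [List.cons_append, missingA_loop, hp, Bool.false_eq_true, if_false]
    exact ih (fun l hl => hpre l (by simp [hl]))

-- A when there is no marker at all
theorem missingA_loop_nomarker (lines : List String) (h : ∀ l ∈ lines, isM l = false) :
    missingA_loop lines false false false = false := by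
  induction lines with
  | nil => simp [missingA_loop]
  | cons l ls ih =>
    have hp : (PySem.Str.strip l == "---") = false := by simpa [isM] using h l (by simp)
    simp only [missingA_loop, hp, Bool.false_eq_true, if_false]
    exact ih (fun x hx => h x (by simp [hx]))

-- decomposition at the first marker
theorem first_marker_decomp (lines : List String) (hne : ¬ ∀ l ∈ lines, isM l = false) :
    ∃ pre m rest, lines = pre ++ m :: rest ∧ (∀ l ∈ pre, isM l = false) ∧ isM m = true := by
  induction lines with
  | nil => exact absurd (by simp) hne
  | cons l ls ih =>
    by_cases h : isM l = true
    · exact ⟨[], l, ls, by simp, by simp, h⟩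
    · simp only [Bool.not_eq_true] at h
      have : ¬ ∀ x ∈ ls, isM x = false := by
        intro hall; exact hne (by intro x hx; rcases List.mem_cons.1 hx with rfl | hx; exact h; exact hall x hx)
      rcases ih this with ⟨pre, m, rest, h1, h2, h3⟩
      exact ⟨l :: pre, m, rest, by simp [h1], by
        intro x hx; rcases List.mem_cons.1 hx with rfl | hx; exact h; exact h2 x hx, h3⟩

-- ===== VERDICT =====
theorem missing_title_or_date_spec : Claim_equal_missing_title_or_date := by
  intro lines _
  unfold Spec_missing_title_or_date missing_title_or_date missing_title_or_date_alt
  by_cases hall : ∀ l ∈ lines, isM l = false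
  · rw [markers_eq_mk, (mk_nil_iff lines 0).2 hall, missingA_loop_nomarker lines hall]
  · rcases first_marker_decomp lines hall with ⟨pre, m, rest, hline, hpre, hm⟩
    subst hline
    rw [markers_eq_mk, mk_append pre m rest 0 hpre hm, missingA_loop_skip pre m rest hpre hm,
        missingA_loop_true]
    have hdrop : (pre ++ m :: rest).drop (pre.length + 1) = rest := by
      simp [List.drop_append]
    rcases mk_head rest ((0:Int) + pre.length + 1) with ⟨h1, h2⟩ | ⟨j, tl, h1, h2, h3⟩
    · rw [h1, h2]
      dsimp only
      have hb : PySem.List.slice (pre ++ m :: rest) (some ((0:Int) + pre.length + 1))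
          (some ((pre ++ m :: rest).length : Int)) = rest := by
        have e1 : ((0:Int) + pre.length + 1) = ((pre.length + 1 : Nat) : Int) := by push_cast; ring
        rw [e1, PySem.List.slice_natCast, hdrop]
        have e2 : (pre ++ m :: rest).length - (pre.length + 1) = rest.length := by
          simp; omega
        rw [e2, List.take_length]
      rw [hb]
      simp only [Bool.false_or]
      rfl
    · rw [h1, h2]
      dsimp only
      have hb : PySem.List.slice (pre ++ m :: rest) (some ((0:Int) + pre.length + 1))
          (some ((0:Int) + pre.length + 1 + j)) = rest.take j := by
        have e1 : ((0:Int) + pre.length + 1) = ((pre.length + 1 : Nat) : Int) := by push_cast; ring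
        rw [e1]
        rw [show ((pre.length + 1 : Nat) : Int) + (j:Int) = ((pre.length + 1 + j : Nat) : Int) from by push_cast; ring]
        rw [PySem.List.slice_natCast, hdrop]
        congr 1; omega
      rw [hb]
      simp only [Bool.false_or]
      rfl
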